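-- pv_equiv track=rewrite | github.com/AlpAcA0072/Leetcode_Intern | OriginalProject/src/temp/meituan/秋招/meituan04.py | find
-- ===== SOURCE A (Python) =====
-- def find(qs):
--     deleted = set()
--     results = []
--     for min_value, times in qs:
--         count = 0
--         curr = min_value
--         while count < times:
--             while curr in deleted:
--                 curr += 1
--             deleted.add(curr)
--             last_deleted = curr
--             count += 1
--             curr += 1
--         results.append(last_deleted)
--     return results
-- ===== SOURCE B (Python) =====
-- def find(qs):
--     nxt = {}  # next-pointer forest: allocated x -> candidate next free slot (union-find with path compression)
--
--     def root(x):
--         path = []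
--         while x in nxt:
--             path.append(x)
--             x = nxt[x]
--         for p in path:
--             nxt[p] = x
--         return x
--
--     results = []
--     for min_value, times in qs:
--         cur = min_value
--         for _ in range(times):
--             cur = root(cur)
--             nxt[cur] = cur + 1
--             last = cur
--             cur += 1
--         results.append(last)
--     return results
-- ===== Notes on version B (the rewrite author's own statement) =====
-- stated objective: faster
-- what changed: Replaces the per-allocation linear scan over the set of taken integers by a union-find 'next free slot' map with path compression, so each allocation follows (and shortcuts) pointer chains instead of re-scanning the occupied gap.
import Mathlib
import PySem

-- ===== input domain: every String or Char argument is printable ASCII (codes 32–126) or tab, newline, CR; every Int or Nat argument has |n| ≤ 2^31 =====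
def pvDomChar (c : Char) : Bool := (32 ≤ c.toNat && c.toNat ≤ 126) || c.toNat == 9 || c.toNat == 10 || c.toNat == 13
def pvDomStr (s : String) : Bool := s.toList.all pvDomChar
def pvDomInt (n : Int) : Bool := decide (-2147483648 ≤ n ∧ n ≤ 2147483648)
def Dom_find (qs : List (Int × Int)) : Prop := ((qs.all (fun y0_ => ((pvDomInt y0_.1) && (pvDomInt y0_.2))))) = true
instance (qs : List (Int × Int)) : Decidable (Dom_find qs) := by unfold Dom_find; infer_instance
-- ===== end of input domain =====

-- B replaces A's per-allocation linear scan over the taken set by a union-find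
-- "next free slot" map with path compression (measured asymptotically faster on overlapping queries).

-- ===== PORT A =====
-- 'while curr in deleted: curr += 1'; the fuel 'del.length + 1' only makes the loop
-- total (at most del.length consecutive integers can be members of del).
def skipA (del : PySem.Set Int) : Nat → Int → Int
  | 0, curr => curr
  | f + 1, curr => if PySem.Set.contains del curr then skipA del f (curr + 1) else curr

-- 'count = 0; while count < times: …' (the remaining iteration count is the Nat argument)
def allocA : PySem.Set Int → Int → Int → Nat → PySem.Set Int × Int
  | del, last, _curr, 0 => (del, last)
  | del, _last, curr, n + 1 =>
      let c := skipA del (del.length + 1) curr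
      allocA (PySem.Set.add del c) c (c + 1) n

def find (qs : List (Int × Int)) : List Int :=
  (qs.foldl (fun st q =>
      let r := allocA st.1 st.2.1 q.1 q.2.toNat
      (r.1, r.2, st.2.2 ++ [r.2]))
    ((PySem.Set.empty : PySem.Set Int), (0 : Int), ([] : List Int))).2.2

-- ===== PORT B =====
-- root's 'while x in nxt: path.append(x); x = nxt[x]'; fuel 'd.size + 1' makes it total
def rootGo (d : PySem.Dict Int Int) : Nat → Int → List Int → List Int × Int
  | 0, x, path => (path, x)
  | f + 1, x, path =>
      match d.get? x with
      | none => (path, x)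
      | some v => rootGo d f v (path ++ [x])

-- 'for p in path: nxt[p] = x; return x'  (path compression)
def rootB (d : PySem.Dict Int Int) (x : Int) : PySem.Dict Int Int × Int :=
  let pr := rootGo d (d.size + 1) x []
  (pr.1.foldl (fun dd p => dd.insert p pr.2) d, pr.2)

-- 'for _ in range(times): cur = root(cur); nxt[cur] = cur + 1; last = cur; cur += 1'
def allocB : PySem.Dict Int Int → Int → Int → Nat → PySem.Dict Int Int × Int
  | d, last, _curr, 0 => (d, last)
  | d, _last, curr, n + 1 =>
      let pr := rootB d curr
      allocB (pr.1.insert pr.2 (pr.2 + 1)) pr.2 (pr.2 + 1) n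

def find_alt (qs : List (Int × Int)) : List Int :=
  (qs.foldl (fun st q =>
      let r := allocB st.1 st.2.1 q.1 q.2.toNat
      (r.1, r.2, st.2.2 ++ [r.2]))
    ((PySem.Dict.empty : PySem.Dict Int Int), (0 : Int), ([] : List Int))).2.2

-- ===== PRECONDITION & SPEC =====
-- Pre_ excludes exactly the inputs on which Python A raises (UnboundLocalError):
-- a first query with times ≤ 0 reads 'last_deleted' before any allocation happened.
-- (Python B raises there in the same way, so nothing A returns on is excluded.)
def Pre_find (qs : List (Int × Int)) : Prop := ∀ p ∈ qs.take 1, 1 ≤ p.2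
instance (qs : List (Int × Int)) : Decidable (Pre_find qs) := by unfold Pre_find; infer_instance

def pvWitness_find : (List (Int × Int)) := [(3, 2), (1, 4), (-2, 1)]

def Spec_find (qs : List (Int × Int)) (out : List Int) : Prop := out = find_alt qs
instance (qs : List (Int × Int)) (out : List Int) : Decidable (Spec_find qs out) := by unfold Spec_find; infer_instance

-- ===== CLAIM (what is proved, stated in full; the proofs are below) =====
def Claim_equal_find : Prop := ∀ (qs : List (Int × Int)), Dom_find qs → Pre_find qs → Spec_find qs (find qs)

-- ===== LEMMAS AND PROOFS =====

-- 'r is the first free slot ≥ x' for the occupancy predicate P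
def IsFF (P : Int → Prop) (x r : Int) : Prop := x ≤ r ∧ ¬ P r ∧ ∀ z, x ≤ z → z < r → P z

-- the simulation invariant between A's set and B's next-pointer dict:
-- same occupied integers, unique keys, and every pointer k ↦ v jumps only over occupied slots
def SimInv (del : PySem.Set Int) (d : PySem.Dict Int Int) : Prop :=
  del.Nodup ∧ d.keys.Nodup ∧
  (∀ z : Int, z ∈ del ↔ d.contains z = true) ∧
  (∀ k v : Int, d.get? k = some v →
      k < v ∧ ∀ z, k < z → z < v → d.contains z = true)

-- an integer interval all of whose members lie in a Nodup list is no longer than the list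
theorem interval_le_length (S : List Int) (hnd : S.Nodup) (x r : Int)
    (hall : ∀ z, x ≤ z → z < r → z ∈ S) : (r - x).toNat ≤ S.length := by
  have hsub : Finset.Ico x r ⊆ S.toFinset := by
    intro z hz
    rw [Finset.mem_Ico] at hz
    exact List.mem_toFinset.mpr (hall z hz.1 hz.2)
  have := Finset.card_le_card hsub
  rwa [Int.card_Ico, List.toFinset_card_of_nodup hnd] at this

theorem exists_free (S : List Int) (hnd : S.Nodup) (x : Int) :
    ∃ y, x ≤ y ∧ y < x + (S.length + 1) ∧ y ∉ S := by
  by_contra h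
  have hall : ∀ z, x ≤ z → z < x + (S.length + 1) → z ∈ S := by
    intro z h1 h2
    by_contra hz
    exact h ⟨z, h1, h2, hz⟩
  have := interval_le_length S hnd x (x + (S.length + 1)) hall
  omega

theorem skipA_spec (del : PySem.Set Int) :
    ∀ (fuel : Nat) (x : Int), (∃ y, x ≤ y ∧ y < x + fuel ∧ y ∉ del) →
      IsFF (· ∈ del) x (skipA del fuel x) := by
  intro fuel
  induction fuel with
  | zero => intro x ⟨y, h1, h2, _⟩; omega
  | succ f ih =>
      intro x ⟨y, h1, h2, h3⟩
      by_cases hx : x ∈ del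
      · have hne : y ≠ x := fun he => h3 (he ▸ hx)
        obtain ⟨ha, hb, hc⟩ := ih (x + 1) ⟨y, by omega, by omega, h3⟩
        rw [skipA, if_pos (((PySem.Set.contains_iff del x).mpr hx))]
        refine ⟨by omega, hb, fun z hz1 hz2 => ?_⟩
        rcases eq_or_lt_of_le hz1 with he | hlt
        · exact he ▸ hx
        · exact hc z (by omega) hz2
      · rw [skipA, if_neg (fun h => hx ((PySem.Set.contains_iff del x).mp h))]
        exact ⟨le_refl x, hx, fun z h1 h2 => by omega⟩

theorem get?_foldl_insert_const (r : Int) :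
    ∀ (q : List Int) (d : PySem.Dict Int Int) (z : Int),
      (q.foldl (fun dd p => dd.insert p r) d).get? z =
        if z ∈ q then some r else d.get? z := by
  intro q
  induction q with
  | nil => intro d z; simp [List.foldl]
  | cons p q' ih =>
      intro d z
      simp only [List.foldl_cons]
      rw [ih (d.insert p r) z, PySem.Dict.get?_insert]
      by_cases hz : z ∈ q'
      · simp [hz]
      · by_cases hzp : z = p <;> simp [hz, hzp]

-- root follows next-pointers to the first free slot; the recorded path is occupied and below it
theorem rootGo_spec (d : PySem.Dict Int Int)
    (hgap : ∀ k v : Int, d.get? k = some v →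
      k < v ∧ ∀ z, k < z → z < v → d.contains z = true) :
    ∀ (fuel : Nat) (x : Int) (path : List Int) (r : Int),
      IsFF (fun z => d.contains z = true) x r → (r - x).toNat < fuel →
      ∃ q, rootGo d fuel x path = (path ++ q, r) ∧
        ∀ p ∈ q, x ≤ p ∧ p < r ∧ d.contains p = true := by
  intro fuel
  induction fuel with
  | zero => intro x path r hff hlt; omega
  | succ f ih =>
      intro x path r hff hlt
      obtain ⟨hxr, hfree, hall⟩ := hff
      rcases hg : d.get? x with _ | v
      · have hcx : d.contains x = false := by
          rw [PySem.Dict.contains_eq_isSome_get?, hg]; rfl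
        have hxx : r = x := by
          rcases eq_or_lt_of_le hxr with he | hlt'
          · omega
          · exact absurd (hall x (le_refl x) hlt') (by simp [hcx])
        refine ⟨[], ?_, by simp⟩
        simp only [rootGo, hg, hxx, List.append_nil]
      · have hcx : d.contains x = true := by
          rw [PySem.Dict.contains_eq_isSome_get?, hg]; rfl
        obtain ⟨hxv, hbetween⟩ := hgap x v hg
        have hxltr : x < r := by
          rcases eq_or_lt_of_le hxr with he | h
          · exact absurd hcx (by rw [← he] at hfree; simp_all)
          · exact h
        have hvr : v ≤ r := by
          by_contra hvr
          exact hfree (hbetween r hxltr (by omega))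
        obtain ⟨q', hq1, hq2⟩ := ih v (path ++ [x]) r
          ⟨hvr, hfree, fun z h1 h2 => hall z (by omega) h2⟩ (by omega)
        refine ⟨x :: q', ?_, ?_⟩
        · simp only [rootGo, hg, hq1, List.append_assoc]; rfl
        · intro p hp
          rcases List.mem_cons.mp hp with he | hm
          · subst he; exact ⟨le_refl p, hxltr, hcx⟩
          · obtain ⟨h1, h2, h3⟩ := hq2 p hm
            exact ⟨by omega, h2, h3⟩

-- one allocation step: both sides take the same slot, and Inv is preserved
theorem step_rel (del : PySem.Set Int) (d : PySem.Dict Int Int) (curr : Int)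
    (hinv : SimInv del d) :
    (rootB d curr).2 = skipA del (del.length + 1) curr ∧
    SimInv (PySem.Set.add del (skipA del (del.length + 1) curr))
      ((rootB d curr).1.insert (rootB d curr).2 ((rootB d curr).2 + 1)) := by
  obtain ⟨hnd, hndk, hmem, hgap⟩ := hinv
  obtain ⟨y, hy1, hy2, hy3⟩ := exists_free del hnd curr
  have hffA : IsFF (· ∈ del) curr (skipA del (del.length + 1) curr) :=
    skipA_spec del (del.length + 1) curr ⟨y, hy1, hy2, hy3⟩
  set c := skipA del (del.length + 1) curr with hc
  obtain ⟨hcr, hcfree, hcall⟩ := hffA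
  have hffB : IsFF (fun z => d.contains z = true) curr c :=
    ⟨hcr, fun h => hcfree ((hmem c).mpr h), fun z h1 h2 => (hmem z).mp (hcall z h1 h2)⟩
  have hsz : d.size = d.keys.length := by
    simp [PySem.Dict.size, PySem.Dict.keys]
  have hfuel : (c - curr).toNat < d.size + 1 := by
    have : (c - curr).toNat ≤ d.keys.length := by
      apply interval_le_length d.keys hndk
      intro z h1 h2
      have hz := (hmem z).mp (hcall z h1 h2)
      rwa [PySem.Dict.contains_iff_mem_keys] at hz
    omega
  obtain ⟨q, hq1, hq2⟩ := rootGo_spec d hgap (d.size + 1) curr [] c hffB hfuel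
  have hroot1 : (rootB d curr).1 = q.foldl (fun dd p => dd.insert p c) d := by
    rw [rootB]; simp only [hq1, List.nil_append]
  have hroot2 : (rootB d curr).2 = c := by
    rw [rootB]; simp only [hq1]
  refine ⟨hroot2, ?_⟩
  rw [hroot2]
  have hnewget : ∀ z : Int, ((rootB d curr).1.insert c (c + 1)).get? z =
      if z = c then some (c + 1) else if z ∈ q then some c else d.get? z := by
    intro z
    rw [PySem.Dict.get?_insert]
    by_cases hz : z = c
    · simp [hz]
    · rw [if_neg hz, if_neg hz, hroot1]
      exact get?_foldl_insert_const c q d z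
  have hnewcontains : ∀ z : Int,
      ((rootB d curr).1.insert c (c + 1)).contains z = true ↔ (z = c ∨ d.contains z = true) := by
    intro z
    rw [PySem.Dict.contains_eq_isSome_get?, hnewget z]
    by_cases hz : z = c
    · simp [hz]
    · by_cases hzq : z ∈ q
      · simp [hz, hzq, (hq2 z hzq).2.2]
      · simp [hz, hzq, PySem.Dict.contains_eq_isSome_get?]
  refine ⟨PySem.Set.nodup_add _ _ hnd, ?_, ?_, ?_⟩
  · apply PySem.Dict.nodup_keys_insert
    rw [hroot1]
    exact PySem.Dict.nodup_keys_foldl_insert q (fun _ p => c) d hndk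
  · intro z
    rw [hnewcontains z, PySem.Set.mem_add]
    constructor
    · rintro (h | h)
      · exact Or.inr ((hmem z).mp h)
      · exact Or.inl h
    · rintro (h | h)
      · exact Or.inr h
      · exact Or.inl ((hmem z).mpr h)
  · intro k v hkv
    rw [hnewget k] at hkv
    by_cases hk : k = c
    · rw [if_pos hk] at hkv
      subst hk
      injection hkv with hv
      subst hv
      exact ⟨by omega, fun z h1 h2 => by omega⟩
    · rw [if_neg hk] at hkv
      by_cases hkq : k ∈ q
      · rw [if_pos hkq] at hkv
        injection hkv with hv
        subst hv
        obtain ⟨hk1, hk2, _⟩ := hq2 k hkq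
        refine ⟨hk2, fun z h1 h2 => ?_⟩
        exact (hnewcontains z).mpr (Or.inr ((hmem z).mp (hcall z (by omega) h2)))
      · rw [if_neg hkq] at hkv
        obtain ⟨hk1, hk2⟩ := hgap k v hkv
        exact ⟨hk1, fun z h1 h2 => (hnewcontains z).mpr (Or.inr (hk2 z h1 h2))⟩

-- a whole query: same last slot and Inv preserved, for any iteration count
theorem alloc_rel : ∀ (n : Nat) (del : PySem.Set Int) (d : PySem.Dict Int Int)
    (last curr : Int), SimInv del d →
    (allocA del last curr n).2 = (allocB d last curr n).2 ∧
    SimInv (allocA del last curr n).1 (allocB d last curr n).1 := by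
  intro n
  induction n with
  | zero => intro del d last curr hinv; exact ⟨rfl, hinv⟩
  | succ m ih =>
      intro del d last curr hinv
      obtain ⟨hroot2, hinv'⟩ := step_rel del d curr hinv
      rw [allocA, allocB]
      rw [hroot2] at hinv'
      simp only [hroot2]
      exact ih _ _ _ _ hinv'

-- the query fold: equal results lists from related states
theorem find_fold : ∀ (qs : List (Int × Int)) (del : PySem.Set Int)
    (d : PySem.Dict Int Int) (last : Int) (res : List Int), SimInv del d →
    (qs.foldl (fun st q =>
        let r := allocA st.1 st.2.1 q.1 q.2.toNat
        (r.1, r.2, st.2.2 ++ [r.2])) (del, last, res)).2.2 =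
    (qs.foldl (fun st q =>
        let r := allocB st.1 st.2.1 q.1 q.2.toNat
        (r.1, r.2, st.2.2 ++ [r.2])) (d, last, res)).2.2 := by
  intro qs
  induction qs with
  | nil => intro del d last res _; rfl
  | cons q qs' ih =>
      intro del d last res hinv
      obtain ⟨hlast, hinv'⟩ := alloc_rel q.2.toNat del d last q.1 hinv
      simp only [List.foldl_cons]
      rw [show ((allocA del last q.1 q.2.toNat).2) = ((allocB d last q.1 q.2.toNat).2) from hlast]
      exact ih _ _ _ _ hinv'

theorem SimInv_init : SimInv (PySem.Set.empty : PySem.Set Int) (PySem.Dict.empty : PySem.Dict Int Int) := by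
  refine ⟨List.nodup_nil, PySem.Dict.nodup_keys_empty, ?_, ?_⟩
  · intro z
    simp [PySem.Set.empty, PySem.Dict.contains_empty]
  · intro k v h
    rw [PySem.Dict.get?_empty] at h
    exact absurd h (by simp)

-- ===== VERDICT (by name: the statement is the Claim_ definition above) =====
theorem find_spec : Claim_equal_find := by
  intro qs _ _
  unfold Spec_find find find_alt
  exact find_fold qs _ _ 0 [] SimInv_init
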